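-- pv_equiv track=rewrite | github.com/kazujp225/DOBASHI | backend/utils/wordcloud_generator.py | extract_tiger_mentions
-- ===== SOURCE A (Python) =====
-- from typing import List, Dict, Optional
-- from collections import Counter
--
-- def extract_tiger_mentions(
--
--     texts: List[str],
--     tiger_aliases: Dict[str, List[str]]
-- ) -> Dict[str, int]:
--     """
--     社長への言及を抽出してカウント
--
--     Args:
--         texts: テキストのリスト
--         tiger_aliases: 社長IDとエイリアスの辞書
--
--     Returns:
--         社長IDと言及数の辞書
--     """
--     tiger_mentions = Counter()
--
--     for text in texts:
--         for tiger_id, aliases in tiger_aliases.items():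
--             for alias in aliases:
--                 if alias in text:
--                     tiger_mentions[tiger_id] += 1
--                     break  # 同じテキストで同じ社長を重複カウントしない
--
--     return dict(tiger_mentions)
-- ===== SOURCE B (Python) =====
-- from typing import List, Dict
--
--
-- def extract_tiger_mentions(
--     texts: List[str],
--     tiger_aliases: Dict[str, List[str]]
-- ) -> Dict[str, int]:
--     # Index all aliases in one hash set; per text, find the matched aliases by
--     # probing each window of the text (one window length per distinct alias
--     # length) against the set, then map matched aliases back to tigers.
--     alias_set = set()
--     for aliases in tiger_aliases.values():
--         alias_set.update(aliases)
--     lengths = sorted({len(a) for a in alias_set})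
--     counts = {}
--     for text in texts:
--         n = len(text)
--         matched = set()
--         for L in lengths:
--             for i in range(n - L + 1):
--                 sub = text[i:i + L]
--                 if sub in alias_set:
--                     matched.add(sub)
--         for tiger_id, aliases in tiger_aliases.items():
--             if any(a in matched for a in aliases):
--                 counts[tiger_id] = counts.get(tiger_id, 0) + 1
--     return counts
-- ===== Notes on version B (the rewrite author's own statement) =====
-- stated objective: alternative
-- what changed: Builds one hash-set index of all aliases up front and, per text, computes the set of matched aliases by probing each text window (one window length per distinct alias length) against that index, then maps matched aliases back to tigers - instead of A's per-(text,tiger,alias) substring scans.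
import Mathlib
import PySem

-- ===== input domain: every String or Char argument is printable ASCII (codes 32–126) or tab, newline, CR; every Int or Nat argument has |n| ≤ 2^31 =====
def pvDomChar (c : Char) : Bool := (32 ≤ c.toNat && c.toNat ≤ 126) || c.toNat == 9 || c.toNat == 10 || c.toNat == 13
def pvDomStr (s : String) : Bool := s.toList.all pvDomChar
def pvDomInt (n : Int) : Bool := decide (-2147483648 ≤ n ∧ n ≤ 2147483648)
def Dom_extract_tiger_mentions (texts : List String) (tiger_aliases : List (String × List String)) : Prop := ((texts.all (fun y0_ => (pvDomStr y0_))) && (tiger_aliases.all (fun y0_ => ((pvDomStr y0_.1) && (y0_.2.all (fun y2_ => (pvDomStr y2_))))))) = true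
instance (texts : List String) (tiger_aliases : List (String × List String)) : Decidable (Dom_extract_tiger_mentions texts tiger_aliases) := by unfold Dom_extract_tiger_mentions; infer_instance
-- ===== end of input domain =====

-- B indexes all aliases in one hash set and, per text, finds matched aliases by probing each
-- window of the text (one window length per distinct alias length) against that set, then maps
-- matched aliases to tigers — instead of A's per-(text,tiger,alias) substring scans.


-- ===== PORT A =====
-- inner 'for alias in aliases: if alias in text: tiger_mentions[tiger_id] += 1; break'
def pvAliasLoop (d : PySem.Dict String Int) (tiger_id text : String) :
    List String → PySem.Dict String Int
  | [] => d
  | alias_ :: rest =>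
      if PySem.Str.isIn alias_ text then d.modify tiger_id 0 (· + 1)
      else pvAliasLoop d tiger_id text rest

def extract_tiger_mentions (texts : List String) (tiger_aliases : List (String × List String)) : List (String × Int) :=
  (texts.foldl
    (fun d text =>
      tiger_aliases.foldl (fun d p => pvAliasLoop d p.1 text p.2) d)
    PySem.Dict.empty).items

-- ===== PORT B =====
-- alias_set = set(); for aliases in tiger_aliases.values(): alias_set.update(aliases)
def pvAliasIndex (tiger_aliases : List (String × List String)) : PySem.Set String :=
  tiger_aliases.foldl (fun s p => PySem.Set.update s p.2) PySem.Set.empty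

-- lengths = sorted({len(a) for a in alias_set})
def pvLengths (aset : PySem.Set String) : List Int :=
  PySem.List.sorted (PySem.Set.ofList (aset.map (fun a => (a.toList.length : Int)))) (fun x => x) false

-- matched = set(); for L in lengths: for i in range(n - L + 1): sub = text[i:i+L]; if sub in alias_set: matched.add(sub)
def pvMatched (aset : PySem.Set String) (lengths : List Int) (text : String) : PySem.Set String :=
  lengths.foldl (fun m L =>
    (PySem.List.pyRange 0 ((text.toList.length : Int) - L + 1) 1).foldl (fun m i =>
      let sub := PySem.Str.slice text (some i) (some (i + L))
      if PySem.Set.contains aset sub then PySem.Set.add m sub else m) m)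
    PySem.Set.empty

def extract_tiger_mentions_alt (texts : List String) (tiger_aliases : List (String × List String)) : List (String × Int) :=
  let aset := pvAliasIndex tiger_aliases
  let lengths := pvLengths aset
  (texts.foldl
    (fun counts text =>
      let matched := pvMatched aset lengths text
      tiger_aliases.foldl (fun counts p =>
        if p.2.any (fun a => PySem.Set.contains matched a)
        then counts.modify p.1 0 (· + 1) else counts) counts)
    PySem.Dict.empty).items

-- ===== PRECONDITION & SPEC =====
def Spec_extract_tiger_mentions (texts : List String) (tiger_aliases : List (String × List String)) (out : List (String × Int)) : Prop := out = extract_tiger_mentions_alt texts tiger_aliases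
instance (texts : List String) (tiger_aliases : List (String × List String)) (out : List (String × Int)) : Decidable (Spec_extract_tiger_mentions texts tiger_aliases out) := by unfold Spec_extract_tiger_mentions; infer_instance

-- ===== CLAIM (what is proved, stated in full; the proofs are below) =====
def Claim_equal_extract_tiger_mentions : Prop := ∀ (texts : List String) (tiger_aliases : List (String × List String)), Dom_extract_tiger_mentions texts tiger_aliases → Spec_extract_tiger_mentions texts tiger_aliases (extract_tiger_mentions texts tiger_aliases)

-- ===== LEMMAS AND PROOFS =====

-- A's alias loop with break = 'if any alias is a substring, bump the counter once'
theorem pvAliasLoop_eq (d : PySem.Dict String Int) (tiger_id text : String) (aliases : List String) :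
    pvAliasLoop d tiger_id text aliases =
      if aliases.any (fun alias_ => PySem.Str.isIn alias_ text) then d.modify tiger_id 0 (· + 1) else d := by
  induction aliases with
  | nil => simp only [pvAliasLoop, List.any_nil, Bool.false_eq_true, if_false]
  | cons a rest ih =>
      simp only [pvAliasLoop]
      rcases Bool.eq_false_or_eq_true (PySem.Str.isIn a text) with h | h
      · rw [if_pos h, if_pos ((by rw [List.any_cons, h, Bool.true_or]) :
          ((a :: rest).any fun alias_ => PySem.Str.isIn alias_ text) = true)]
      · have hcond : ((a :: rest).any fun alias_ => PySem.Str.isIn alias_ text)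
            = (rest.any fun alias_ => PySem.Str.isIn alias_ text) := by
          rw [List.any_cons, h, Bool.false_or]
        rw [if_neg (by rw [h]; exact Bool.false_ne_true), ih, hcond]

-- membership in the alias index
theorem mem_pvAliasIndex_fold (l : List (String × List String)) (s : PySem.Set String) (a : String) :
    a ∈ l.foldl (fun s p => PySem.Set.update s p.2) s ↔ a ∈ s ∨ ∃ p ∈ l, a ∈ p.2 := by
  induction l generalizing s with
  | nil => simp
  | cons p rest ih =>
      rw [List.foldl_cons, ih]
      simp [PySem.Set.mem_update, or_assoc]

theorem mem_pvAliasIndex (tiger_aliases : List (String × List String)) (a : String) :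
    a ∈ pvAliasIndex tiger_aliases ↔ ∃ p ∈ tiger_aliases, a ∈ p.2 := by
  unfold pvAliasIndex
  rw [mem_pvAliasIndex_fold]
  simp [PySem.Set.empty]

-- every alias length occurs in the sorted length list
theorem mem_pvLengths (aset : PySem.Set String) (a : String) (ha : a ∈ aset) :
    ((a.toList.length : Int)) ∈ pvLengths aset := by
  unfold pvLengths
  rw [PySem.List.mem_sorted, PySem.Set.mem_ofList]
  exact List.mem_map.2 ⟨a, ha, rfl⟩

-- the inner position loop: what ends up in 'matched'
theorem mem_pos_fold (aset : PySem.Set String) (text : String) (L : Int)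
    (is : List Int) (m : PySem.Set String) (a : String) :
    a ∈ is.foldl (fun m i =>
        let sub := PySem.Str.slice text (some i) (some (i + L))
        if PySem.Set.contains aset sub then PySem.Set.add m sub else m) m
      ↔ a ∈ m ∨ ∃ i ∈ is, PySem.Str.slice text (some i) (some (i + L)) = a ∧ a ∈ aset := by
  induction is generalizing m with
  | nil => simp
  | cons i rest ih =>
      simp only [List.foldl_cons]
      rw [ih]
      by_cases h : PySem.Set.contains aset (PySem.Str.slice text (some i) (some (i + L))) = true
      · rw [if_pos h]
        have hmem : PySem.Str.slice text (some i) (some (i + L)) ∈ aset :=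
          (PySem.Set.contains_iff _ _).1 h
        simp only [PySem.Set.mem_add, List.mem_cons]
        constructor
        · rintro ((hm | heq) | ⟨j, hj, hs, hset⟩)
          · exact Or.inl hm
          · exact Or.inr ⟨i, Or.inl rfl, heq.symm, heq ▸ hmem⟩
          · exact Or.inr ⟨j, Or.inr hj, hs, hset⟩
        · rintro (hm | ⟨j, hj | hj, hs, hset⟩)
          · exact Or.inl (Or.inl hm)
          · subst hj; exact Or.inl (Or.inr hs.symm)
          · exact Or.inr ⟨j, hj, hs, hset⟩
      · rw [if_neg h]
        simp only [List.mem_cons]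
        constructor
        · rintro (hm | ⟨j, hj, hs, hset⟩)
          · exact Or.inl hm
          · exact Or.inr ⟨j, Or.inr hj, hs, hset⟩
        · rintro (hm | ⟨j, hj | hj, hs, hset⟩)
          · exact Or.inl hm
          · subst hj
            exact absurd ((PySem.Set.contains_iff _ _).2 (hs ▸ hset)) h
          · exact Or.inr ⟨j, hj, hs, hset⟩

theorem mem_pvMatched_fold (aset : PySem.Set String) (text : String)
    (ls : List Int) (m : PySem.Set String) (a : String) :
    a ∈ ls.foldl (fun m L =>
        (PySem.List.pyRange 0 ((text.toList.length : Int) - L + 1) 1).foldl (fun m i =>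
          let sub := PySem.Str.slice text (some i) (some (i + L))
          if PySem.Set.contains aset sub then PySem.Set.add m sub else m) m) m
      ↔ a ∈ m ∨ ∃ L ∈ ls, ∃ i ∈ PySem.List.pyRange 0 ((text.toList.length : Int) - L + 1) 1,
          PySem.Str.slice text (some i) (some (i + L)) = a ∧ a ∈ aset := by
  induction ls generalizing m with
  | nil => simp
  | cons L rest ih =>
      rw [List.foldl_cons, ih, mem_pos_fold]
      simp only [List.mem_cons]
      constructor
      · rintro ((hm | ⟨i, hi, hs, hset⟩) | ⟨L', hL', hrest⟩)
        · exact Or.inl hm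
        · exact Or.inr ⟨L, Or.inl rfl, i, hi, hs, hset⟩
        · exact Or.inr ⟨L', Or.inr hL', hrest⟩
      · rintro (hm | ⟨L', hL' | hL', hrest⟩)
        · exact Or.inl (Or.inl hm)
        · subst hL'; exact Or.inl (Or.inr hrest)
        · exact Or.inr ⟨L', hL', hrest⟩

-- characterisation of 'matched': exactly the indexed aliases occurring as substrings of the text
theorem mem_pvMatched (aset : PySem.Set String) (text a : String) :
    a ∈ pvMatched aset (pvLengths aset) text ↔ a ∈ aset ∧ PySem.Str.isIn a text = true := by
  unfold pvMatched
  rw [mem_pvMatched_fold]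
  simp only [PySem.Set.empty, List.not_mem_nil, false_or]
  constructor
  · rintro ⟨L, hL, i, hi, hs, hset⟩
    refine ⟨hset, ?_⟩
    rw [PySem.List.mem_pyRange_one] at hi
    obtain ⟨hi0, hilt⟩ := hi
    -- L is the length of some indexed alias, hence nonnegative
    have hL0 : 0 ≤ L := by
      unfold pvLengths at hL
      rw [PySem.List.mem_sorted, PySem.Set.mem_ofList] at hL
      obtain ⟨b, _, hb⟩ := List.mem_map.1 hL
      omega
    obtain ⟨i', rfl⟩ := Int.eq_ofNat_of_zero_le hi0
    obtain ⟨L', rfl⟩ := Int.eq_ofNat_of_zero_le hL0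
    have hslice : (PySem.Str.slice text (some (i' : Int)) (some ((i' : Int) + (L' : Int)))).toList
        = (text.toList.drop i').take L' := by
      rw [PySem.Str.toList_slice, PySem.Chars.slice_eq_listSlice, PySem.List.slice_natCast_add]
    have hatl : a.toList = (text.toList.drop i').take L' := by rw [← hs, hslice]
    rw [PySem.Str.isIn_iff_infix, hatl]
    exact (List.take_prefix _ _).isInfix.trans (List.drop_suffix _ _).isInfix
  · rintro ⟨hset, hin⟩
    rw [PySem.Str.isIn_iff_infix] at hin
    obtain ⟨j, hpre⟩ : ∃ j, a.toList <+: text.toList.drop j := by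
      rw [PySem.Chars.exists_prefix_drop_iff_isIn, PySem.Chars.isIn_iff_infix]
      exact hin
    -- normalise the occurrence position into [0, n]
    have hpre' : a.toList <+: text.toList.drop (min j text.toList.length) := by
      rcases Decidable.em (j ≤ text.toList.length) with hle | hlt
      · rwa [min_eq_left hle]
      · have hlt2 : text.toList.length < j := Nat.lt_of_not_le hlt
        rw [min_eq_right (le_of_lt hlt2)]
        rw [List.drop_eq_nil_of_le (le_of_lt hlt2)] at hpre
        rw [List.drop_eq_nil_of_le (le_refl _)]
        exact hpre
    have hlen : a.toList.length ≤ text.toList.length - min j text.toList.length := by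
      have h1 := hpre'.length_le
      rw [List.length_drop] at h1
      exact h1
    have hjn : min j text.toList.length ≤ text.toList.length := min_le_right _ _
    refine ⟨(a.toList.length : Int), mem_pvLengths aset a hset,
      ((min j text.toList.length : Nat) : Int), ?_, ?_, hset⟩
    · rw [PySem.List.mem_pyRange_one]
      refine ⟨Int.natCast_nonneg _, ?_⟩
      push_cast
      omega
    · have htake : (text.toList.drop (min j text.toList.length)).take a.toList.length = a.toList := by
        obtain ⟨t, ht⟩ := hpre'
        rw [← ht, List.take_left]
      have hteq : (PySem.Str.slice text (some ((min j text.toList.length : Nat) : Int))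
          (some (((min j text.toList.length : Nat) : Int) + (a.toList.length : Int)))).toList = a.toList := by
        rw [PySem.Str.toList_slice, PySem.Chars.slice_eq_listSlice, PySem.List.slice_natCast_add, htake]
      exact String.toList_inj.1 hteq

-- per tiger entry: membership test against 'matched' = the substring test
theorem any_matched_eq (tiger_aliases : List (String × List String)) (text : String)
    (p : String × List String) (hp : p ∈ tiger_aliases) :
    (p.2.any (fun a => PySem.Set.contains (pvMatched (pvAliasIndex tiger_aliases) (pvLengths (pvAliasIndex tiger_aliases)) text) a))
      = (p.2.any (fun alias_ => PySem.Str.isIn alias_ text)) := by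
  rw [Bool.eq_iff_iff]
  simp only [List.any_eq_true]
  constructor
  · rintro ⟨a, ha, hc⟩
    rw [PySem.Set.contains_iff, mem_pvMatched] at hc
    exact ⟨a, ha, hc.2⟩
  · rintro ⟨a, ha, hin⟩
    refine ⟨a, ha, ?_⟩
    rw [PySem.Set.contains_iff, mem_pvMatched]
    exact ⟨(mem_pvAliasIndex tiger_aliases a).2 ⟨p, hp, ha⟩, hin⟩

-- ===== VERDICT (by name: the statement is the Claim_ definition above) =====
theorem extract_tiger_mentions_spec : Claim_equal_extract_tiger_mentions := by
  intro texts tiger_aliases _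
  unfold Spec_extract_tiger_mentions extract_tiger_mentions extract_tiger_mentions_alt
  congr 1
  refine PySem.List.foldl_congr_mem texts _ _ _ (fun d text _ => ?_)
  refine PySem.List.foldl_congr_mem tiger_aliases _ _ _ (fun d p hp => ?_)
  rw [pvAliasLoop_eq, any_matched_eq tiger_aliases text p hp]
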